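-- pv_equiv track=rewrite | github.com/arek-grows/Challenges | Challenges 181-200/Challenge183.py | is_sequential_decrementing
-- ===== SOURCE A (Python) =====
-- def is_sequential_decrementing(x):
--     x = str(x)
--     n_before = int(x[0])
--     for n in x[1:]:
--         n = int(n)
--         if n != n_before - 1:
--             return False
--         n_before -= 1
--     return True
-- ===== SOURCE B (Python) =====
-- def is_sequential_decrementing(x):
--     s = str(x)
--     d0 = int(s[0])
--     expected = ''.join(str(d0 - i) for i in range(len(s)))
--     return expected == s
-- ===== Notes on version B (the rewrite author's own statement) =====
-- stated objective: simpler
-- what changed: Instead of A's stateful per-digit loop with early exit (decrement a counter, compare each next digit), B builds the whole ideal decrementing string from the first digit once and returns a single string comparison.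
import Mathlib
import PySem

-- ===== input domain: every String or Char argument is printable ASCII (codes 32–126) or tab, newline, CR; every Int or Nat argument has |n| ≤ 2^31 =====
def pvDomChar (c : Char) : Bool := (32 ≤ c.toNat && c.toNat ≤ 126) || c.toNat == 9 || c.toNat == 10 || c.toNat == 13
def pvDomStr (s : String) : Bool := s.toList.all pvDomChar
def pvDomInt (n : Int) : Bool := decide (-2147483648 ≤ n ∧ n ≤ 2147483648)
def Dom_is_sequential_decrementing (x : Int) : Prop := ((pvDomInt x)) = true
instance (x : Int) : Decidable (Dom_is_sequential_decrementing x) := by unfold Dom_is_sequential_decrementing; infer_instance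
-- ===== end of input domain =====

-- B replaces A's stateful per-digit loop (decrementing counter, early exit) by building the whole
-- expected fully-decremented string from the first digit once and comparing it with str(x): simpler.


-- ===== PORT A =====
-- the for-loop of A: 'for n in x[1:]: n = int(n); if n != n_before - 1: return False; n_before -= 1'
-- (int(n) on a single char; under Pre_ the char is always a decimal digit, so ofChars? is always some)
def isdLoop : List Char → Int → Bool
  | [], _ => true
  | c :: t, nb =>
    let n := (PySem.Int.ofChars? [c]).getD 0
    if n ≠ nb - 1 then false else isdLoop t (nb - 1)

def is_sequential_decrementing (x : Int) : Bool :=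
  let s := PySem.Int.toChars x                                   -- x = str(x)
  let nb := ((PySem.List.pyGet? s 0).bind
      (fun c => PySem.Int.ofChars? [c])).getD 0                  -- n_before = int(x[0]); some under Pre_
  isdLoop (PySem.List.slice s (some 1) none) nb                  -- loop over x[1:]

-- ===== PORT B =====
def is_sequential_decrementing_alt (x : Int) : Bool :=
  let s := PySem.Int.toChars x                                   -- s = str(x)
  let d0 := ((PySem.List.pyGet? s 0).bind
      (fun c => PySem.Int.ofChars? [c])).getD 0                  -- d0 = int(s[0]); some under Pre_
  let expected := PySem.Chars.join []
      ((PySem.List.pyRange 0 (PySem.List.len s) 1).map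
        (fun i => PySem.Int.toChars (d0 - i)))                   -- ''.join(str(d0 - i) for i in range(len(s)))
  decide (expected = s)                                          -- expected == s

-- ===== PRECONDITION & SPEC =====
-- Pre_ excludes exactly the x < 0, where both Pythons raise ValueError: str(x)[0] is '-' and int('-') raises.
def Pre_is_sequential_decrementing (x : Int) : Prop := 0 ≤ x
instance (x : Int) : Decidable (Pre_is_sequential_decrementing x) := by unfold Pre_is_sequential_decrementing; infer_instance
def pvWitness_is_sequential_decrementing : Int := (321)

def Spec_is_sequential_decrementing (x : Int) (out : Bool) : Prop := out = is_sequential_decrementing_alt x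
instance (x : Int) (out : Bool) : Decidable (Spec_is_sequential_decrementing x out) := by unfold Spec_is_sequential_decrementing; infer_instance

-- ===== CLAIM (what is proved, stated in full; the proofs are below) =====
def Claim_equal_is_sequential_decrementing : Prop := ∀ (x : Int), Dom_is_sequential_decrementing x → Pre_is_sequential_decrementing x → Spec_is_sequential_decrementing x (is_sequential_decrementing x)

-- ===== LEMMAS AND PROOFS =====

-- a digit char's Nat bounds
theorem pv_isDigit_bounds (c : Char) (h : c.isDigit = true) : 48 ≤ c.toNat ∧ c.toNat ≤ 57 := by
  simp [Char.isDigit] at h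
  exact ⟨h.1, h.2⟩

-- int(c) for a single decimal digit char
theorem pv_ofChars_digit (c : Char) (h : c.isDigit = true) :
    PySem.Int.ofChars? [c] = some ((c.toNat : Int) - 48) := by
  obtain ⟨h1, h2⟩ := pv_isDigit_bounds c h
  have hc : Char.ofNat c.toNat = c := Char.ofNat_toNat c
  set m := c.toNat with hm
  rw [← hc]
  interval_cases m <;> decide

-- str(v) is never the empty string
theorem pv_toChars_ne_nil (v : Int) : PySem.Int.toChars v ≠ [] := by
  unfold PySem.Int.toChars
  split
  · simp
  · have := @Nat.length_toDigits_pos 10 v.toNat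
    intro h; rw [h] at this; simp at this

-- str(v) is the one-char string [c] (c a digit) exactly when v is the value of c
theorem pv_toChars_singleton_iff (c : Char) (h : c.isDigit = true) (v : Int) :
    PySem.Int.toChars v = [c] ↔ v = (c.toNat : Int) - 48 := by
  constructor
  · intro he
    unfold PySem.Int.toChars at he
    split at he
    · rename_i hv
      have := @Nat.length_toDigits_pos 10 v.natAbs
      cases hd : Nat.toDigits 10 v.natAbs with
      | nil => rw [hd] at this; simp at this
      | cons a l => rw [hd] at he; simp at he
    · rename_i hv
      push Not at hv
      have hlen : (Nat.toDigits 10 v.toNat).length ≤ 1 := by rw [he]; simp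
      have hlt : v.toNat < 10 := by
        have := (Nat.length_toDigits_le_iff (b := 10) (n := v.toNat) (k := 1)
          (by norm_num) (by norm_num)).mp hlen
        simpa using this
      rw [Nat.toDigits_of_lt_base hlt] at he
      have hc : c = (v.toNat).digitChar := by
        have := he; injection this with h1 _; exact h1.symm
      have hv' : v = (v.toNat : Int) := (Int.toNat_of_nonneg hv).symm
      rw [hv']
      set m := v.toNat with hm
      interval_cases m <;> (subst hc; decide)
  · intro hv
    obtain ⟨h1, h2⟩ := pv_isDigit_bounds c h
    have hc : Char.ofNat c.toNat = c := Char.ofNat_toNat c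
    subst hv
    rw [← hc]
    set m := c.toNat with hm
    interval_cases m <;> decide

-- the chunks of B's expected string: exp d n = str(d) + str(d-1) + … (n chunks)
def pvExp (d : Int) : Nat → List Char
  | 0 => []
  | n + 1 => PySem.Int.toChars d ++ pvExp (d - 1) n

theorem pv_len_exp (d : Int) (n : Nat) : n ≤ (pvExp d n).length := by
  induction n generalizing d with
  | zero => simp [pvExp]
  | succ k ih =>
    have h1 : 1 ≤ (PySem.Int.toChars d).length := by
      cases hd : PySem.Int.toChars d with
      | nil => exact absurd hd (pv_toChars_ne_nil d)
      | cons a l => simp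
    have := ih (d - 1)
    simp [pvExp]
    omega

-- ''.join over the range IS flatten of the chunk list
theorem pv_join_nil (ps : List (List Char)) : PySem.Chars.join [] ps = ps.flatten := by
  induction ps with
  | nil => simp [PySem.Chars.join, List.intercalate]
  | cons p ps ih =>
    cases ps with
    | nil => simp [PySem.Chars.join, List.intercalate]
    | cons q qs =>
      rw [PySem.Chars.join_cons_cons]
      simp only [List.flatten_cons]
      rw [ih]
      simp

-- the flattened chunk list is pvExp
theorem pv_flatten_eq_exp (d : Int) (n : Nat) :
    ((PySem.List.pyRange 0 (n : Int) 1).map (fun i => PySem.Int.toChars (d - i))).flatten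
      = pvExp d n := by
  induction n generalizing d with
  | zero => simp [pvExp]
  | succ k ih =>
    have hcons : PySem.List.pyRange 0 ((k : Int) + 1) 1 = 0 :: PySem.List.pyRange 1 ((k : Int) + 1) 1 :=
      PySem.List.pyRange_one_cons (by omega)
    have hshift : (PySem.List.pyRange 1 ((k : Int) + 1) 1).map (fun i => PySem.Int.toChars (d - i))
        = (PySem.List.pyRange 0 (k : Int) 1).map (fun i => PySem.Int.toChars ((d - 1) - i)) := by
      rw [PySem.List.pyRange_one, PySem.List.pyRange_one, List.map_map, List.map_map]
      have h1 : ((k : Int) + 1 - 1).toNat = k := by omega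
      have h2 : ((k : Int) - 0).toNat = k := by omega
      rw [h1, h2]
      apply List.map_congr_left
      intro a _
      simp only [Function.comp]
      congr 1
      ring
    push_cast
    rw [hcons]
    simp only [List.map_cons, List.flatten_cons, hshift, ih (d - 1)]
    simp [pvExp]

-- A's loop equals comparing the tail against the expected chunks
theorem pv_loop_eq_exp (l : List Char) (d : Int) (hd : ∀ c ∈ l, c.isDigit = true) :
    isdLoop l d = decide (pvExp (d - 1) l.length = l) := by
  induction l generalizing d with
  | nil => simp [isdLoop, pvExp]
  | cons c t ih =>
    have hc : c.isDigit = true := hd c (by simp)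
    have ht : ∀ c' ∈ t, c'.isDigit = true := fun c' h' => hd c' (by simp [h'])
    simp only [isdLoop, pv_ofChars_digit c hc, Option.getD_some]
    by_cases hv : (c.toNat : Int) - 48 = d - 1
    · have hsing : PySem.Int.toChars (d - 1) = [c] :=
        (pv_toChars_singleton_iff c hc (d - 1)).mpr hv.symm
      rw [if_neg (by omega)]
      rw [ih (d - 1) ht]
      simp only [List.length_cons, pvExp, hsing]
      simp
    · rw [if_pos (by omega)]
      have hne : pvExp (d - 1) (t.length + 1) ≠ c :: t := by
        intro he
        simp only [pvExp] at he
        cases hd1 : PySem.Int.toChars (d - 1) with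
        | nil => exact absurd hd1 (pv_toChars_ne_nil (d - 1))
        | cons a u =>
          rw [hd1] at he
          simp at he
          obtain ⟨ha, hu⟩ := he
          cases u with
          | nil =>
            have : PySem.Int.toChars (d - 1) = [c] := by rw [hd1, ha]
            exact hv (((pv_toChars_singleton_iff c hc (d - 1)).mp this).symm)
          | cons b w =>
            have hlen := congrArg List.length hu
            have := pv_len_exp (d - 1 - 1) t.length
            simp at hlen
            omega
      simp only [List.length_cons]
      simp [hne]

-- ===== VERDICT (by name: the statement is the Claim_ definition above) =====
theorem is_sequential_decrementing_spec : Claim_equal_is_sequential_decrementing := by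
  intro x _ hpre
  unfold Spec_is_sequential_decrementing
  unfold is_sequential_decrementing is_sequential_decrementing_alt
  have hx : ¬ x < 0 := by
    unfold Pre_is_sequential_decrementing at hpre
    omega
  have hs : PySem.Int.toChars x = Nat.toDigits 10 x.toNat := by
    unfold PySem.Int.toChars; rw [if_neg hx]
  have hdig : ∀ c ∈ PySem.Int.toChars x, c.isDigit = true := by
    intro c hc
    rw [hs] at hc
    exact Nat.isDigit_of_mem_toDigits (by norm_num) (by norm_num) hc
  cases hsl : PySem.Int.toChars x with
  | nil => exact absurd hsl (pv_toChars_ne_nil x)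
  | cons c0 rest =>
    have hc0 : c0.isDigit = true := hdig c0 (by rw [hsl]; simp)
    have hrest : ∀ c ∈ rest, c.isDigit = true := fun c hc => hdig c (by rw [hsl]; simp [hc])
    simp only [PySem.List.pyGet?_zero_cons, Option.bind_some, pv_ofChars_digit c0 hc0,
      Option.getD_some, PySem.List.slice_from_one, List.tail_cons]
    rw [pv_loop_eq_exp rest ((c0.toNat : Int) - 48) hrest]
    rw [pv_join_nil]
    have hlen : PySem.List.len (c0 :: rest) = ((rest.length + 1 : Nat) : Int) := by
      simp [PySem.List.len_eq]
    rw [hlen, pv_flatten_eq_exp]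
    have hsing : PySem.Int.toChars ((c0.toNat : Int) - 48) = [c0] :=
      (pv_toChars_singleton_iff c0 hc0 _).mpr rfl
    simp only [pvExp, hsing]
    simp
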